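-- pv_equiv track=rewrite | github.com/linjiw/unitree-g1-doc | scripts/eval_openai_compatible.py | match_patterns
-- ===== SOURCE A (Python) =====
-- def match_patterns(values: list[str], patterns: list[str]) -> tuple[int, int]:
--     if not values or not patterns:
--         return 0, len(patterns)
--     hits = 0
--     lowered_values = [v.lower() for v in values]
--     for pat in patterns:
--         p = pat.lower()
--         if any(p in val for val in lowered_values):
--             hits += 1
--     return hits, len(patterns)
-- ===== SOURCE B (Python) =====
-- def match_patterns(values: list[str], patterns: list[str]) -> tuple[int, int]:
--     unmatched = dict(enumerate(p.lower() for p in patterns))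
--     for lv in dict.fromkeys(v.lower() for v in values):
--         if not unmatched:
--             break
--         hit = [i for i, p in unmatched.items() if p in lv]
--         for i in hit:
--             del unmatched[i]
--     return len(patterns) - len(unmatched), len(patterns)
-- ===== Notes on version B (the rewrite author's own statement) =====
-- stated objective: alternative
-- what changed: B inverts the iteration: it scans the deduplicated lowered values as the outer loop against a shrinking dict of still-unmatched pattern indices (stopping early when it empties) and returns len(patterns) minus the leftovers, instead of A's per-pattern any-scan over all values with a counter.
import Mathlib
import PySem

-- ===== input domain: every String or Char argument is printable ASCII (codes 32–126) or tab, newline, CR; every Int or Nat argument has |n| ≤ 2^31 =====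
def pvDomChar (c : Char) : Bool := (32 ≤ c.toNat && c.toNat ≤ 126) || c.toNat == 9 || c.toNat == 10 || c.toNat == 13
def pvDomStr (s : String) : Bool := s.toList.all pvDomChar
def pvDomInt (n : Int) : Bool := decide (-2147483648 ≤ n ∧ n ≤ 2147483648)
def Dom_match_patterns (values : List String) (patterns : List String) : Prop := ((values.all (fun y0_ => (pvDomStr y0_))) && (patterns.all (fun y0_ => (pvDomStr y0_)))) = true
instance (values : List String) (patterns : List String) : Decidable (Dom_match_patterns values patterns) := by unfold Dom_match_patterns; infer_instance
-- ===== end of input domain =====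

-- B swaps the loop nesting: it scans values in the outer loop and collects indices of
-- matched patterns into a set, instead of A's per-pattern any-scan with a counter.

-- B inverts the loops: it scans the deduplicated lowered values against a shrinking dict
-- of still-unmatched pattern indices, instead of A's per-pattern any-scan with a counter.

-- ===== PORT A =====
def match_patterns (values : List String) (patterns : List String) : Int × Int :=
  if values = [] ∨ patterns = [] then (0, PySem.List.len patterns)
  else
    let lowered_values := values.map PySem.Str.lower
    let hits : Int := patterns.foldl (fun hits pat =>
      let p := PySem.Str.lower pat
      if lowered_values.any (fun val => PySem.Str.isIn p val) then hits + 1 else hits) 0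
    (hits, PySem.List.len patterns)

-- ===== PORT B =====
-- 'for i in hit: del unmatched[i]' is the inner foldl of erase; the loop's
-- 'if not unmatched: break' is ported as a guard that leaves the state unchanged
-- on the remaining iterations (what breaking computes).
def match_patterns_alt (values : List String) (patterns : List String) : Int × Int :=
  let unmatched : PySem.Dict Int String :=
    (PySem.List.enumerate (patterns.map PySem.Str.lower)).foldl
      (fun d ip => d.insert ip.1 ip.2) PySem.Dict.empty
  let final : PySem.Dict Int String :=
    (PySem.List.dedup (values.map PySem.Str.lower)).foldl
      (fun u lv =>
        if u.items = [] then u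
        else
          let hit := (u.items.filter (fun ip => PySem.Str.isIn ip.2 lv)).map Prod.fst
          hit.foldl (fun u i => u.erase i) u)
      unmatched
  (PySem.List.len patterns - PySem.List.len final.items, PySem.List.len patterns)

-- ===== PRECONDITION & SPEC =====
def Spec_match_patterns (values : List String) (patterns : List String) (out : Int × Int) : Prop := out = match_patterns_alt values patterns
instance (values : List String) (patterns : List String) (out : Int × Int) : Decidable (Spec_match_patterns values patterns out) := by unfold Spec_match_patterns; infer_instance

-- ===== CLAIM (what is proved, stated in full; the proofs are below) =====
def Claim_equal_match_patterns : Prop := ∀ (values : List String) (patterns : List String), Dom_match_patterns values patterns → Spec_match_patterns values patterns (match_patterns values patterns)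

-- ===== LEMMAS AND PROOFS =====

lemma enum_fst_le : ∀ (xs : List String) (k : Int) (p : Int × String),
    p ∈ PySem.List.enumerate xs k → k ≤ p.1 := by
  intro xs
  induction xs with
  | nil => intro k p h; simp [PySem.List.enumerate] at h
  | cons x t ih =>
      intro k p h
      simp only [PySem.List.enumerate, List.mem_cons] at h
      rcases h with rfl | h
      · exact le_refl _
      · have := ih (k + 1) p h; omega

lemma enum_pairwise : ∀ (xs : List String) (k : Int),
    (PySem.List.enumerate xs k).Pairwise (fun a b => a.1 < b.1) := by
  intro xs
  induction xs with
  | nil => intro k; simp [PySem.List.enumerate]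
  | cons x t ih =>
      intro k
      simp only [PySem.List.enumerate]
      exact List.Pairwise.cons (fun b hb => by have := enum_fst_le t (k + 1) b hb; omega) (ih (k + 1))

lemma enum_keys_nodup (xs : List String) (k : Int) :
    ((PySem.List.enumerate xs k).map Prod.fst).Nodup := by
  have h := (enum_pairwise xs k).map Prod.fst (fun {a b} h => h)
  exact h.imp (fun h => ne_of_lt h)

lemma enum_length : ∀ (xs : List String) (k : Int),
    (PySem.List.enumerate xs k).length = xs.length := by
  intro xs
  induction xs with
  | nil => intro k; simp [PySem.List.enumerate]
  | cons x t ih => intro k; simp only [PySem.List.enumerate, List.length_cons, ih (k + 1)]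

lemma enum_countP (c : String → Bool) : ∀ (xs : List String) (k : Int),
    (PySem.List.enumerate xs k).countP (fun p => c p.2) = xs.countP c := by
  intro xs
  induction xs with
  | nil => intro k; simp [PySem.List.enumerate]
  | cons x t ih =>
      intro k
      simp only [PySem.List.enumerate, List.countP_cons, ih (k + 1)]

-- dict(pairs-with-fresh-distinct-keys): insert just appends
lemma build_insert : ∀ (L : List (Int × String)) (d : PySem.Dict Int String),
    (∀ p ∈ L, d.contains p.1 = false) → ((L.map Prod.fst).Nodup) →
    L.foldl (fun d ip => d.insert ip.1 ip.2) d = ⟨d.items ++ L⟩ := by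
  intro L
  induction L with
  | nil => intro d _ _; simp
  | cons hd tl ih =>
      intro d hfresh hnd
      simp only [List.foldl_cons]
      have hcd : d.contains hd.1 = false := hfresh hd (List.mem_cons_self ..)
      have hins : d.insert hd.1 hd.2 = (⟨d.items ++ [hd]⟩ : PySem.Dict Int String) := by
        simp [PySem.Dict.insert, hcd]
      rw [hins]
      have hkey : hd.1 ∉ tl.map Prod.fst := by
        simp only [List.map_cons, List.nodup_cons] at hnd
        exact hnd.1
      have hfresh' : ∀ p ∈ tl, (⟨d.items ++ [hd]⟩ : PySem.Dict Int String).contains p.1 = false := by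
        intro p hp
        have h1 : d.contains p.1 = false := hfresh p (List.mem_cons_of_mem _ hp)
        have h2 : (hd.1 == p.1) = false := by
          apply beq_eq_false_iff_ne.mpr
          intro he
          exact hkey (he ▸ List.mem_map_of_mem hp)
        simp only [PySem.Dict.contains, List.any_append, List.any_cons, List.any_nil] at h1 ⊢
        simp [h1, h2]
      have hnd' : (tl.map Prod.fst).Nodup := by
        simp only [List.map_cons, List.nodup_cons] at hnd
        exact hnd.2
      rw [ih _ hfresh' hnd']
      simp

-- 'for i in ks: del u[i]' = one filter on the items
lemma erase_fold : ∀ (ks : List Int) (u : List (Int × String)),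
    ks.foldl (fun (d : PySem.Dict Int String) i => d.erase i) ⟨u⟩
      = ⟨u.filter (fun p => ks.all (fun k => !(p.1 == k)))⟩ := by
  intro ks
  induction ks with
  | nil => intro u; simp
  | cons k t ih =>
      intro u
      simp only [List.foldl_cons]
      have h1 : (⟨u⟩ : PySem.Dict Int String).erase k = ⟨u.filter (fun p => !(p.1 == k))⟩ := rfl
      rw [h1, ih]
      congr 1
      rw [List.filter_filter]
      apply List.filter_congr
      intro p _
      simp [List.all_cons, Bool.and_comm]

-- deleting the hit keys of a nodup-keyed dict keeps exactly the non-matching items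
lemma step_items (c : Int × String → Bool) (u : List (Int × String))
    (hnd : (u.map Prod.fst).Nodup) :
    ((u.filter c).map Prod.fst).foldl (fun (d : PySem.Dict Int String) i => d.erase i) ⟨u⟩
      = ⟨u.filter (fun p => !(c p))⟩ := by
  rw [erase_fold]
  congr 1
  apply List.filter_congr
  intro p hp
  by_cases hc : c p = true
  · rw [hc]
    have hmem : p.1 ∈ (u.filter c).map Prod.fst :=
      List.mem_map_of_mem (List.mem_filter.mpr ⟨hp, hc⟩)
    simp only [Bool.not_true]
    apply List.all_eq_false.mpr
    exact ⟨p.1, hmem, by simp⟩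
  · have hc' : c p = false := Bool.eq_false_iff.mpr hc
    rw [hc']
    simp only [Bool.not_false]
    apply List.all_eq_true.mpr
    intro k hk
    rcases List.mem_map.mp hk with ⟨q, hq, rfl⟩
    have hqu : q ∈ u := (List.mem_filter.mp hq).1
    have hqc : c q = true := (List.mem_filter.mp hq).2
    have hne : p.1 ≠ q.1 := by
      intro he
      have hpq : p = q := List.inj_on_of_nodup_map hnd hp hqu he
      rw [hpq, hqc] at hc'
      exact absurd hc' (by decide)
    simp [hne]

-- the whole scan over the (deduplicated) values: one filter on the initial items
lemma values_fold : ∀ (W : List String) (u : List (Int × String)),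
    (u.map Prod.fst).Nodup →
    W.foldl (fun (d : PySem.Dict Int String) lv =>
        if d.items = [] then d
        else ((d.items.filter (fun ip => PySem.Str.isIn ip.2 lv)).map Prod.fst).foldl
          (fun d i => d.erase i) d) ⟨u⟩
      = ⟨u.filter (fun p => W.all (fun lv => !(PySem.Str.isIn p.2 lv)))⟩ := by
  intro W
  induction W with
  | nil => intro u _; simp
  | cons lv W ih =>
      intro u hnd
      simp only [List.foldl_cons]
      by_cases hu : u = []
      · subst hu
        rw [if_pos rfl, ih [] (by simp)]
        simp
      · rw [if_neg hu, step_items _ u hnd]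
        have hnd' : ((u.filter (fun p => !(PySem.Str.isIn p.2 lv))).map Prod.fst).Nodup :=
          ((List.filter_sublist (l := u)).map Prod.fst).nodup hnd
        rw [ih _ hnd']
        congr 1
        rw [List.filter_filter]
        apply List.filter_congr
        intro p _
        simp [List.all_cons, Bool.and_comm]

-- A's hit condition, as one boolean on the lowered pattern
lemma dedup_any (values : List String) (s : String) :
    (PySem.List.dedup (values.map PySem.Str.lower)).any (fun lv => PySem.Str.isIn s lv)
      = (values.map PySem.Str.lower).any (fun val => PySem.Str.isIn s val) := by
  rcases h : (values.map PySem.Str.lower).any (fun val => PySem.Str.isIn s val) with _ | _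
  · apply Bool.eq_false_iff.mpr
    intro h2
    rcases List.any_eq_true.mp h2 with ⟨lv, hlv, hc⟩
    have : lv ∈ values.map PySem.Str.lower := (PySem.List.mem_dedup _ _).mp hlv
    rw [List.any_eq_false] at h
    exact absurd hc (by simpa using h lv this)
  · rcases List.any_eq_true.mp h with ⟨lv, hlv, hc⟩
    exact List.any_eq_true.mpr ⟨lv, (PySem.List.mem_dedup _ _).mpr hlv, hc⟩

-- the count B ends with is A's count
lemma final_count (values patterns : List String) :
    ((PySem.List.enumerate (patterns.map PySem.Str.lower) 0).filter
        (fun p => (PySem.List.dedup (values.map PySem.Str.lower)).all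
          (fun lv => !(PySem.Str.isIn p.2 lv)))).length
      = patterns.length - patterns.countP
          (fun pat => (values.map PySem.Str.lower).any
            (fun val => PySem.Str.isIn (PySem.Str.lower pat) val)) := by
  set D := PySem.List.dedup (values.map PySem.Str.lower) with hD
  set E := PySem.List.enumerate (patterns.map PySem.Str.lower) 0 with hE
  have hnotall : ∀ p : Int × String,
      (D.all (fun lv => !(PySem.Str.isIn p.2 lv))) = !(D.any (fun lv => PySem.Str.isIn p.2 lv)) :=
    fun p => Eq.symm List.not_any_eq_all_not
  have h1 : (E.filter (fun p => D.all (fun lv => !(PySem.Str.isIn p.2 lv)))).length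
      = E.countP (fun p => !(D.any (fun lv => PySem.Str.isIn p.2 lv))) := by
    rw [← List.countP_eq_length_filter]
    apply List.countP_congr
    intro p _
    rw [hnotall p]
  have hsum := List.length_eq_countP_add_countP
    (l := E) (fun p => D.any (fun lv => PySem.Str.isIn p.2 lv))
  have h2 : E.countP (fun p => !(D.any (fun lv => PySem.Str.isIn p.2 lv)))
      = E.countP (fun p => decide ¬ (D.any (fun lv => PySem.Str.isIn p.2 lv)) = true) := by
    apply List.countP_congr
    intro p _
    simp
  have h3 : E.countP (fun p => D.any (fun lv => PySem.Str.isIn p.2 lv))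
      = patterns.countP (fun pat => (values.map PySem.Str.lower).any
          (fun val => PySem.Str.isIn (PySem.Str.lower pat) val)) := by
    rw [hE, enum_countP (fun s => D.any (fun lv => PySem.Str.isIn s lv)) _ 0,
      List.countP_map]
    apply List.countP_congr
    intro pat _
    simp only [Function.comp_apply]
    rw [dedup_any values (PySem.Str.lower pat)]
  have hlen : E.length = patterns.length := by
    rw [hE, enum_length]
    simp
  omega

-- ===== VERDICT (by name: the statement is the Claim_ definition above) =====
theorem match_patterns_spec : Claim_equal_match_patterns := by
  intro values patterns _
  unfold Spec_match_patterns
  have hB : match_patterns_alt values patterns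
      = (((patterns.countP (fun pat =>
            (values.map PySem.Str.lower).any
              (fun val => PySem.Str.isIn (PySem.Str.lower pat) val))) : Int),
         PySem.List.len patterns) := by
    simp only [match_patterns_alt]
    have hbuild : (PySem.List.enumerate (patterns.map PySem.Str.lower)).foldl
        (fun d ip => d.insert ip.1 ip.2) PySem.Dict.empty
        = (⟨PySem.List.enumerate (patterns.map PySem.Str.lower) 0⟩ : PySem.Dict Int String) := by
      rw [build_insert _ _ (fun p _ => rfl) (enum_keys_nodup _ 0)]
      rfl
    rw [hbuild, values_fold _ _ (enum_keys_nodup _ 0)]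
    have hc := final_count values patterns
    have hle := List.countP_le_length
      (p := fun pat => (values.map PySem.Str.lower).any
        (fun val => PySem.Str.isIn (PySem.Str.lower pat) val)) (l := patterns)
    simp only [PySem.List.len_eq, hc]
    rw [Prod.mk.injEq]
    refine ⟨?_, rfl⟩
    omega
  rw [hB]
  unfold match_patterns
  split_ifs with h
  · have hz : patterns.countP (fun pat =>
        (values.map PySem.Str.lower).any
          (fun val => PySem.Str.isIn (PySem.Str.lower pat) val)) = 0 := by
      rcases h with rfl | rfl
      · simp
      · simp
    rw [hz]; rfl
  · simp only [PySem.List.foldl_count_if, zero_add]
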